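-- pv_equiv track=rewrite | github.com/35au1/Endless-Online-bot-2025 | eobot032025.py | get_closest_mob
-- ===== SOURCE A (Python) =====
-- def calculate_distance(x1, y1, x2, y2):
--     """Calculate Manhattan distance."""
--     return abs(x1 - x2) + abs(y1 - y2)
--
-- def get_closest_mob(tracked_mobs, char_x, char_y, current_target_id=None, targeting_locked=False):
--     """Find closest mob with hysteresis for current target."""
--     if targeting_locked and current_target_id in tracked_mobs:
--         return current_target_id
--
--     closest_mobs = []
--     min_distance = float('inf')
--
--     for mob_id, coords in tracked_mobs.items():
--         if coords.get('inactive', False):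
--             continue
--
--         distance = calculate_distance(char_x, char_y, coords['x'], coords['y'])
--
--         if distance < min_distance:
--             min_distance = distance
--             closest_mobs = [(mob_id, coords['x'], coords['y'], distance)]
--         elif distance == min_distance:
--             closest_mobs.append((mob_id, coords['x'], coords['y'], distance))
--
--     if not closest_mobs:
--         return None
--
--     if len(closest_mobs) > 1:
--         closest_mobs.sort(key=lambda mob: (mob[1], mob[2]))
--
--     closest_mob_id = closest_mobs[0][0]
--     closest_distance = closest_mobs[0][3]
--
--     # Keep current target if it's within 2 blocks
--     if current_target_id in tracked_mobs:
--         current_dist = calculate_distance(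
--             char_x, char_y,
--             tracked_mobs[current_target_id]['x'],
--             tracked_mobs[current_target_id]['y']
--         )
--         if current_dist <= closest_distance + 2:
--             return current_target_id
--
--     return closest_mob_id
-- ===== SOURCE B (Python) =====
-- def calculate_distance(x1, y1, x2, y2):
--     """Calculate Manhattan distance."""
--     return abs(x1 - x2) + abs(y1 - y2)
--
-- def get_closest_mob(tracked_mobs, char_x, char_y, current_target_id=None, targeting_locked=False):
--     """Find closest mob with hysteresis for current target."""
--     if targeting_locked and current_target_id in tracked_mobs:
--         return current_target_id
--     active = [(mob_id, c['x'], c['y'], calculate_distance(char_x, char_y, c['x'], c['y']))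
--               for mob_id, c in tracked_mobs.items() if not c.get('inactive', False)]
--     if not active:
--         return None
--     best = min(active, key=lambda m: (m[3], m[1], m[2]))
--     # Keep current target if it's within 2 blocks
--     if current_target_id in tracked_mobs:
--         c = tracked_mobs[current_target_id]
--         if calculate_distance(char_x, char_y, c['x'], c['y']) <= best[3] + 2:
--             return current_target_id
--     return best[0]
-- ===== Notes on version B (the rewrite author's own statement) =====
-- stated objective: simpler
-- what changed: Replaces A's running-minimum + tie-list accumulator followed by a conditional in-place sort with one comprehension of active (id,x,y,dist) tuples and a single stable min() over the composite key (distance, x, y); the hysteresis block is kept as in A.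
import Mathlib
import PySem

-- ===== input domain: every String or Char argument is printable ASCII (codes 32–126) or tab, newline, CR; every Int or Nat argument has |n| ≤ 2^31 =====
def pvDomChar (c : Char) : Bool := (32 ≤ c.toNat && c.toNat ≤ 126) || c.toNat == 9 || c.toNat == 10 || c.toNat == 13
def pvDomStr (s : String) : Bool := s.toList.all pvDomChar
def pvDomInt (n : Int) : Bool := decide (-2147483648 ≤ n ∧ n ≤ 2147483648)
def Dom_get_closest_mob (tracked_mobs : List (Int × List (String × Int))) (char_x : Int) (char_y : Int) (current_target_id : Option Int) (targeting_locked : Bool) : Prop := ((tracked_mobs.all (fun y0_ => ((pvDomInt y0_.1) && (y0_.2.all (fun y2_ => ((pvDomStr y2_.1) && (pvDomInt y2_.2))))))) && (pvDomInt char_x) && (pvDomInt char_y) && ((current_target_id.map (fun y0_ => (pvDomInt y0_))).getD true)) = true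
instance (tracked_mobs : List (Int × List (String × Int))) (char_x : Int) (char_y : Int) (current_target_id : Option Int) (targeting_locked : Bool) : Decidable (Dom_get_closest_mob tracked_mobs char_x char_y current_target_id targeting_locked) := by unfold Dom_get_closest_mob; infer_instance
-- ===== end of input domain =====

-- B replaces A's running-min + tie-list accumulator + conditional sort with one comprehension and a
-- single stable min over the composite key (distance, x, y): simpler, same input/output behaviour.
-- (Python A sorts `closest_mobs` in place; that local list is not caller-visible, so only the return
-- value matters here.)

-- ===== PORT A =====
-- shared coordinate helpers (both Pythons read coords the same way: 'inactive' truthy test,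
-- coords['x'] / coords['y'] — KeyError excluded by Pre_, so getD 0 is exact there — and the
-- Manhattan distance from calculate_distance)
def pvActive (p : Int × List (String × Int)) : Bool :=
  (PySem.Dict.ofList p.2).getD "inactive" 0 == 0

def pvTup (char_x char_y : Int) (p : Int × List (String × Int)) : Int × Int × Int × Int :=
  let cd := PySem.Dict.ofList p.2
  (p.1, cd.getD "x" 0, cd.getD "y" 0, |char_x - cd.getD "x" 0| + |char_y - cd.getD "y" 0|)

-- the trailing hysteresis block, identical in both Pythons ('if current_target_id in tracked_mobs: …')
def pvHysteresis (d : PySem.Dict Int (List (String × Int))) (char_x char_y : Int)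
    (tid? : Option Int) (cid cdist : Int) : Option Int :=
  match tid? with
  | none => some cid
  | some t =>
    match d.get? t with
    | none => some cid
    | some c =>
      let cd := PySem.Dict.ofList c
      if |char_x - cd.getD "x" 0| + |char_y - cd.getD "y" 0| ≤ cdist + 2 then some t else some cid

-- A's loop body: running minimum distance (none = float('inf')) plus the list of tied closest mobs
def pvAstep (s : List (Int × Int × Int × Int) × Option Int) (m : Int × Int × Int × Int) :
    List (Int × Int × Int × Int) × Option Int :=
  match s.2 with
  | none => ([m], some m.2.2.2)
  | some md =>
    if m.2.2.2 < md then ([m], some m.2.2.2)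
    else if m.2.2.2 = md then (s.1 ++ [m], some md)
    else s

def get_closest_mob (tracked_mobs : List (Int × List (String × Int))) (char_x : Int) (char_y : Int) (current_target_id : Option Int) (targeting_locked : Bool) : Option Int :=
  let d := PySem.Dict.ofList tracked_mobs
  let tgtIn : Bool := match current_target_id with | some t => d.contains t | none => false
  if targeting_locked && tgtIn then current_target_id
  else
    let s := d.items.foldl
      (fun s p => if pvActive p then pvAstep s (pvTup char_x char_y p) else s) ([], none)
    match s.1 with
    | [] => none
    | b0 :: rest =>
      let cl := if 0 < rest.length then
                  PySem.List.sorted2 (b0 :: rest) (fun m => m.2.1) (fun m => m.2.2.1)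
                else b0 :: rest
      let best := cl.headD b0
      pvHysteresis d char_x char_y current_target_id best.1 best.2.2.2

-- ===== PORT B =====
-- Python's tuple comparison (m[3], m[1], m[2]) < (b[3], b[1], b[2]), used as min's key
def pvLtKey (m b : Int × Int × Int × Int) : Bool :=
  decide (m.2.2.2 < b.2.2.2) ||
    (m.2.2.2 == b.2.2.2 &&
      (decide (m.2.1 < b.2.1) || (m.2.1 == b.2.1 && decide (m.2.2.1 < b.2.2.1))))

def get_closest_mob_alt (tracked_mobs : List (Int × List (String × Int))) (char_x : Int) (char_y : Int) (current_target_id : Option Int) (targeting_locked : Bool) : Option Int :=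
  let d := PySem.Dict.ofList tracked_mobs
  let tgtIn : Bool := match current_target_id with | some t => d.contains t | none => false
  if targeting_locked && tgtIn then current_target_id
  else
    let active := (d.items.filter pvActive).map (pvTup char_x char_y)
    match active with
    | [] => none
    | h :: t =>
      let best := t.foldl (fun acc m => if pvLtKey m acc then m else acc) h
      pvHysteresis d char_x char_y current_target_id best.1 best.2.2.2

-- ===== PRECONDITION & SPEC =====
def pvHasXY (c : List (String × Int)) : Bool :=
  (PySem.Dict.ofList c).contains "x" && (PySem.Dict.ofList c).contains "y"

-- Pre_ excludes exactly the inputs where Python A raises KeyError: an active mob's coords lacking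
-- 'x' or 'y', or (when some mob is active) a present current target whose coords lack 'x' or 'y'.
def Pre_get_closest_mob (tracked_mobs : List (Int × List (String × Int))) (char_x : Int) (char_y : Int) (current_target_id : Option Int) (targeting_locked : Bool) : Prop :=
  let d := PySem.Dict.ofList tracked_mobs
  let tgtIn : Bool := match current_target_id with | some t => d.contains t | none => false
  (targeting_locked = true ∧ tgtIn = true) ∨
    ((∀ p ∈ d.items, pvActive p = true → pvHasXY p.2 = true) ∧
      ((tgtIn = true ∧ ∃ p ∈ d.items, pvActive p = true) →
        ((current_target_id.map (fun t =>
            ((d.get? t).map (fun c => pvHasXY c)).getD true)).getD true) = true))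
instance (tracked_mobs : List (Int × List (String × Int))) (char_x : Int) (char_y : Int) (current_target_id : Option Int) (targeting_locked : Bool) : Decidable (Pre_get_closest_mob tracked_mobs char_x char_y current_target_id targeting_locked) := by unfold Pre_get_closest_mob; infer_instance

def pvWitness_get_closest_mob : (List (Int × List (String × Int))) × Int × Int × Option Int × Bool :=
  ([(1, [("x", 0), ("y", 0)]), (2, [("x", 3), ("y", 1)])], 0, 0, some 2, false)

def Spec_get_closest_mob (tracked_mobs : List (Int × List (String × Int))) (char_x : Int) (char_y : Int) (current_target_id : Option Int) (targeting_locked : Bool) (out : Option Int) : Prop := out = get_closest_mob_alt tracked_mobs char_x char_y current_target_id targeting_locked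
instance (tracked_mobs : List (Int × List (String × Int))) (char_x : Int) (char_y : Int) (current_target_id : Option Int) (targeting_locked : Bool) (out : Option Int) : Decidable (Spec_get_closest_mob tracked_mobs char_x char_y current_target_id targeting_locked out) := by unfold Spec_get_closest_mob; infer_instance

-- ===== CLAIM (what is proved, stated in full; the proofs are below) =====
def Claim_equal_get_closest_mob : Prop := ∀ (tracked_mobs : List (Int × List (String × Int))) (char_x : Int) (char_y : Int) (current_target_id : Option Int) (targeting_locked : Bool), Dom_get_closest_mob tracked_mobs char_x char_y current_target_id targeting_locked → Pre_get_closest_mob tracked_mobs char_x char_y current_target_id targeting_locked → Spec_get_closest_mob tracked_mobs char_x char_y current_target_id targeting_locked (get_closest_mob tracked_mobs char_x char_y current_target_id targeting_locked)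

-- ===== LEMMAS AND PROOFS =====

-- B's first-minimum of a nonempty list, as an Option
def pvBmin (l : List (Int × Int × Int × Int)) : Option (Int × Int × Int × Int) :=
  match l with
  | [] => none
  | h :: t => some (t.foldl (fun acc m => if pvLtKey m acc then m else acc) h)

-- helper: appending one element to the stable sort inserts it
theorem pvSorted2_append (cl : List (Int × Int × Int × Int)) (m : Int × Int × Int × Int) :
    PySem.List.sorted2 (cl ++ [m]) (fun m => m.2.1) (fun m => m.2.2.1) =
      PySem.List.insertBy
        (fun a b => decide (a.2.1 < b.2.1) || (!decide (b.2.1 < a.2.1) && decide (a.2.2.1 < b.2.2.1)))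
        m (PySem.List.sorted2 cl (fun m => m.2.1) (fun m => m.2.2.1)) := by
  simp [PySem.List.sorted2, List.foldl_append]

theorem pvInsertBy_head (before : (Int × Int × Int × Int) → (Int × Int × Int × Int) → Bool)
    (m h : Int × Int × Int × Int) (t : List (Int × Int × Int × Int)) :
    (PySem.List.insertBy before m (h :: t)).head? = some (if before m h then m else h) := by
  simp [PySem.List.insertBy]; split <;> simp

theorem pvCore' (l : List (Int × Int × Int × Int)) (hne : l ≠ []) :
    ∃ cl dm b, l.foldl pvAstep ([], none) = (cl, some dm) ∧ cl ≠ [] ∧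
      (∀ m ∈ cl, m.2.2.2 = dm) ∧
      (PySem.List.sorted2 cl (fun m => m.2.1) (fun m => m.2.2.1)).head? = some b ∧
      pvBmin l = some b ∧ b.2.2.2 = dm := by
  induction l using List.reverseRecOn with
  | nil => exact absurd rfl hne
  | append_singleton l m ih =>
    cases l with
    | nil =>
      refine ⟨[m], m.2.2.2, m, ?_, by simp, by simp, ?_, ?_, rfl⟩
      · simp [pvAstep]
      · simp [PySem.List.sorted2, PySem.List.insertBy]
      · simp [pvBmin]
    | cons h t =>
      obtain ⟨cl, dm, b, hfold, hclne, hall, hhead, hbmin, hbd⟩ := ih (by simp)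
      have hBnew : pvBmin ((h :: t) ++ [m]) = some (if pvLtKey m b then m else b) := by
        simp only [pvBmin, List.cons_append, List.foldl_append, List.foldl_cons, List.foldl_nil]
        simp only [pvBmin, Option.some.injEq] at hbmin
        rw [hbmin]
      rw [List.foldl_append, List.foldl_cons, List.foldl_nil, hfold]
      rcases lt_trichotomy m.2.2.2 dm with hlt | heq | hgt
      · -- new strictly closer mob: A restarts the tie list, B takes m
        refine ⟨[m], m.2.2.2, m, ?_, by simp, by simp, ?_, ?_, rfl⟩
        · simp [pvAstep, hlt]
        · simp [PySem.List.sorted2, PySem.List.insertBy]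
        · rw [hBnew]
          have : pvLtKey m b = true := by simp [pvLtKey, hbd]; omega
          simp [this]
      · -- tie: A appends m, B keeps the (x,y)-smaller of b and m
        refine ⟨cl ++ [m], dm, if pvLtKey m b then m else b, ?_, by simp, ?_, ?_, hBnew, ?_⟩
        · simp [pvAstep, heq]
        · intro x hx
          rcases List.mem_append.1 hx with hx | hx
          · exact hall x hx
          · simp at hx; subst hx; exact heq
        · rw [pvSorted2_append]
          rcases hst : PySem.List.sorted2 cl (fun m => m.2.1) (fun m => m.2.2.1) with _ | ⟨b', t'⟩
          · rw [hst] at hhead; simp at hhead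
          · rw [hst] at hhead
            have hb : b' = b := by simpa using hhead
            subst hb
            rw [pvInsertBy_head]
            congr 1
            have hd : m.2.2.2 = b'.2.2.2 := by omega
            by_cases h1 : m.2.1 < b'.2.1
            · simp [pvLtKey, hd, h1]
            · by_cases h2 : m.2.1 = b'.2.1
              · simp [pvLtKey, hd, h2]
              · simp [pvLtKey, hd, h1, h2, show b'.2.1 < m.2.1 by omega]
        · split <;> [exact heq; exact hbd]
      · -- farther mob: A skips it, B keeps b
        have hfalse : pvLtKey m b = false := by simp [pvLtKey, hbd]; omega
        refine ⟨cl, dm, b, ?_, hclne, hall, hhead, ?_, hbd⟩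
        · simp [pvAstep, show ¬(m.2.2.2 < dm) by omega, show ¬(m.2.2.2 = dm) by omega]
        · rw [hBnew, hfalse]; simp

theorem pvFoldFilter (items : List (Int × List (String × Int))) (cx cy : Int) :
    items.foldl (fun s p => if pvActive p then pvAstep s (pvTup cx cy p) else s) ([], none)
      = ((items.filter pvActive).map (pvTup cx cy)).foldl pvAstep ([], none) := by
  rw [List.foldl_map, PySem.List.foldl_if_eq_foldl_filter]

-- A's tie-list head (after the conditional sort) is B's stable first minimum
theorem pvBest_eq (l : List (Int × Int × Int × Int)) (hne : l ≠ []) :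
    ∃ b0 rest b, (l.foldl pvAstep ([], none)).1 = b0 :: rest ∧ pvBmin l = some b ∧
      ((if 0 < rest.length then
          PySem.List.sorted2 (b0 :: rest) (fun m => m.2.1) (fun m => m.2.2.1)
        else b0 :: rest).headD b0) = b := by
  obtain ⟨cl, dm, b, hfold, hclne, hall, hhead, hbmin, hbd⟩ := pvCore' l hne
  cases cl with
  | nil => exact absurd rfl hclne
  | cons b0 rest =>
    refine ⟨b0, rest, b, by rw [hfold], hbmin, ?_⟩
    cases rest with
    | nil =>
      have hb : b = b0 := by
        simp [PySem.List.sorted2, PySem.List.insertBy] at hhead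
        exact hhead.symm
      simp [hb]
    | cons r rs =>
      simp only [List.length_cons, Nat.zero_lt_succ, if_pos]
      rcases hst : PySem.List.sorted2 (b0 :: r :: rs) (fun m => m.2.1) (fun m => m.2.2.1)
        with _ | ⟨x, xs⟩
      · rw [hst] at hhead; simp at hhead
      · rw [hst] at hhead
        simp at hhead ⊢
        exact hhead

theorem get_closest_mob_spec : Claim_equal_get_closest_mob := by
  unfold Claim_equal_get_closest_mob
  intro tm cx cy tid lock hdom hpre
  clear hdom hpre
  unfold Spec_get_closest_mob get_closest_mob get_closest_mob_alt
  by_cases hC : (lock && (match tid with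
      | some t => (PySem.Dict.ofList tm).contains t
      | none => false)) = true
  · simp only [hC, if_true]
  · simp only [Bool.not_eq_true] at hC
    simp only [hC, Bool.false_eq_true, if_false]
    rcases hact : ((PySem.Dict.ofList tm).items.filter pvActive).map (pvTup cx cy)
      with _ | ⟨h, t⟩
    · simp only [pvFoldFilter, hact, List.foldl_nil]
    · obtain ⟨b0, rest, b, h1, h2, h3⟩ := pvBest_eq (h :: t) (by simp)
      have h2' : t.foldl (fun acc m => if pvLtKey m acc then m else acc) h = b := by
        simpa [pvBmin] using h2
      simp only [pvFoldFilter, hact, h2']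
      simp only [h1, h3]
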